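-- pv_equiv track=rewrite | github.com/huawei-csl/GENIAL | src/genial/utils/files/verilog_formatting.py | reformat_code
-- ===== SOURCE A (Python) =====
-- def reformat_code(input_str):
--     def find_matching_paren(s, start):
--         # Finds the index of the matching closing parenthesis for the opening at index 'start'
--         stack = []
--         for i in range(start, len(s)):
--             if s[i] == "(":
--                 stack.append(i)
--             elif s[i] == ")":
--                 stack.pop()
--                 if not stack:
--                     return i
--         return -1  # No matching closing parenthesis found
--
--     def split_on_commas(s):
--         # Splits the string on commas that are not inside parentheses
--         result = []
--         current = ""
--         depth = 0
--         for c in s: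
--             if c == "," and depth == 0:
--                 result.append(current)
--                 current = ""
--             else:
--                 if c == "(":
--                     depth += 1
--                 elif c == ")":
--                     depth -= 1
--                 current += c
--         result.append(current)
--         return result
--
--     def process_content(s):
--         # Processes the content inside the parentheses
--         items = split_on_commas(s)
--         items = [item.strip() for item in items]
--         formatted_items = []
--         for idx, item in enumerate(items):
--             # Add commas except for the last item
--             comma = "," if idx < len(items) - 1 else ""
--             formatted_items.append(f" {item}{comma}")
--         return "\n".join(formatted_items)
--
--     result = ""
--     i = 0
--     while i < len(input_str):
--         if input_str[i] == "(":
--             # Find the matching closing parenthesis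
--             end = find_matching_paren(input_str, i)
--             if end == -1:
--                 # No matching closing parenthesis; append the rest and break
--                 result += input_str[i:]
--                 break
--             else:
--                 # Process the content inside the parentheses
--                 content = input_str[i + 1 : end]
--                 formatted_content = process_content(content)
--
--                 # Collect any characters after the closing parenthesis (like semicolons)
--                 after_paren = ""
--                 j = end + 1
--                 while j < len(input_str) and input_str[j] in " \t;":
--                     after_paren += input_str[j]
--                     j += 1
--                 i = j - 1  # Adjust the index to continue from the correct position
--
--                 # Append the formatted content
--                 result += "(\n" + formatted_content + "\n)" + after_paren
--         else:
--             result += input_str[i]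
--         i += 1
--     return result
-- ===== SOURCE B (Python) =====
-- def reformat_code(input_str):
--     # Single linear state-machine pass: outside groups copy chars; inside a
--     # top-level (...) accumulate comma-split items (and raw text for the
--     # unclosed case) and emit the reformatted group on the closing paren.
--     out = []
--     depth = 0
--     raw = []    # chars since the opening '(' inclusive (for the unclosed case)
--     items = []  # completed top-level items of the current group
--     cur = []    # current item being accumulated
--     for c in input_str:
--         if depth == 0:
--             if c == "(":
--                 depth = 1
--                 raw = ["("]
--                 items = []
--                 cur = []
--             else:
--                 out.append(c)
--         else:
--             raw.append(c)
--             if c == "(":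
--                 depth += 1
--                 cur.append(c)
--             elif c == ")":
--                 depth -= 1
--                 if depth == 0:
--                     items.append("".join(cur))
--                     body = ",\n".join(" " + it.strip() for it in items)
--                     out.append("(\n" + body + "\n)")
--                 else:
--                     cur.append(c)
--             elif c == "," and depth == 1:
--                 items.append("".join(cur))
--                 cur = []
--             else:
--                 cur.append(c)
--     if depth > 0:
--         out.append("".join(raw))
--     return "".join(out)
-- ===== Notes on version B (the rewrite author's own statement) =====
-- stated objective: faster
-- what changed: A repeatedly calls find_matching_paren to locate each close, slices out the content, re-scans it with split_on_commas plus an enumerate loop, and grows the result by string += ; B is one linear state-machine pass with a depth counter that copies chars outside groups, accumulates comma-split items (and raw text for the unclosed case) inside, buffers output pieces in a list and joins once.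
import Mathlib
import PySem

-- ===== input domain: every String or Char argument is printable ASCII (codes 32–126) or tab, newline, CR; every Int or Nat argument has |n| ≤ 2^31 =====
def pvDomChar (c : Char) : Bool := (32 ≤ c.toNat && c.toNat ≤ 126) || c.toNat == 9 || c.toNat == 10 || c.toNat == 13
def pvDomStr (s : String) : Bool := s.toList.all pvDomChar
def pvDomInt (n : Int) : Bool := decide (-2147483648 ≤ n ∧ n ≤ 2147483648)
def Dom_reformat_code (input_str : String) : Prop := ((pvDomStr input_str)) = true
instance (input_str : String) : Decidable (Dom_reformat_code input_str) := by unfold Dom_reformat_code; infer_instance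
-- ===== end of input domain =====

-- B reformats the same parenthesized comma lists in one linear state-machine pass
-- (depth counter + item/raw buffers) instead of A's find-matching-paren-then-slice-and-resplit.

-- ===== PORT A =====
-- find_matching_paren(s, start): the loop 'for i in range(start, len(s))' walks the suffix
-- s[start:], carrying the running index i and the stack of open-paren indices.
-- (The '[]' case of the ')' branch is Python's stack.pop() on an empty stack — unreachable,
-- since find_matching_paren is only called with s[start] == '(' which pushes first.)
def pvFindLoop : List Char → Nat → List Nat → Int
  | [], _, _ => -1
  | c :: rest, i, st =>
    if c = '(' then pvFindLoop rest (i + 1) (i :: st)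
    else if c = ')' then
      match st with
      | [] => pvFindLoop rest (i + 1) []
      | [_] => (i : Int)
      | _ :: st' => pvFindLoop rest (i + 1) st'
    else pvFindLoop rest (i + 1) st

-- split_on_commas: fold with (result, current, depth) state
def pvSocLoop : List Char → List (List Char) → List Char → Int → List (List Char)
  | [], res, cur, _ => res ++ [cur]
  | c :: rest, res, cur, depth =>
    if c = ',' ∧ depth = 0 then pvSocLoop rest (res ++ [cur]) [] depth
    else
      pvSocLoop rest res (cur ++ [c])
        (if c = '(' then depth + 1 else if c = ')' then depth - 1 else depth)

def pvSplitOnCommas (s : List Char) : List (List Char) := pvSocLoop s [] [] 0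

-- the 'for idx, item in enumerate(items)' loop of process_content (n = len(items))
def pvProcLoop : List (List Char) → Nat → Nat → List (List Char)
  | [], _, _ => []
  | it :: rest, idx, n =>
    (' ' :: it ++ (if idx < n - 1 then [','] else [])) :: pvProcLoop rest (idx + 1) n

def pvProcessContent (s : List Char) : List Char :=
  let items := (pvSplitOnCommas s).map PySem.Chars.strip
  PySem.Chars.join ['\n'] (pvProcLoop items 0 items.length)

-- the inner 'while j < len(input_str) and input_str[j] in " \t;"' loop; returns (after_paren, j)
def pvApLoop (s : List Char) (j : Nat) (ap : List Char) : List Char × Nat :=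
  if h : j < s.length then
    if s[j] = ' ' ∨ s[j] = '\t' ∨ s[j] = ';' then pvApLoop s (j + 1) (ap ++ [s[j]]) else (ap, j)
  else (ap, j)
termination_by s.length - j

-- termination helpers for the main while loop (i strictly increases each iteration)
theorem pvFindLoop_lb (cs : List Char) (i : Nat) (st : List Nat)
    (h : pvFindLoop cs i st ≠ -1) : (i : Int) ≤ pvFindLoop cs i st := by
  induction cs generalizing i st with
  | nil => simp [pvFindLoop] at h
  | cons c rest ih =>
    simp only [pvFindLoop] at h ⊢
    by_cases h1 : c = '('
    · rw [if_pos h1] at h ⊢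
      have := ih (i + 1) (i :: st) h; omega
    · rw [if_neg h1] at h ⊢
      by_cases h2 : c = ')'
      · rw [if_pos h2] at h ⊢
        cases st with
        | nil =>
          show (i : Int) ≤ pvFindLoop rest (i + 1) []
          have := ih (i + 1) [] h; omega
        | cons x st' =>
          cases st' with
          | nil => exact le_refl _
          | cons y st'' =>
            show (i : Int) ≤ pvFindLoop rest (i + 1) (y :: st'')
            have := ih (i + 1) (y :: st'') h; omega
      · rw [if_neg h2] at h ⊢
        have := ih (i + 1) st h; omega

theorem pvApLoop_lb (s : List Char) (j : Nat) (ap : List Char) :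
    j ≤ (pvApLoop s j ap).2 := by
  fun_induction pvApLoop s j ap with
  | case1 j ap h hc ih => omega
  | case2 => simp
  | case3 => simp

-- the main 'while i < len(input_str)' loop, with result accumulator res
def pvMainA (s : List Char) (i : Nat) (res : List Char) : List Char :=
  if h : i < s.length then
    if s[i] = '(' then
      let e := pvFindLoop (s.drop i) i []
      if he : e = -1 then res ++ s.drop i
      else
        let content := PySem.List.slice s (some ((i : Int) + 1)) (some e)
        let formatted := pvProcessContent content
        let apj := pvApLoop s (e.toNat + 1) []
        pvMainA s apj.2 (res ++ ('(' :: '\n' :: formatted) ++ ('\n' :: ')' :: apj.1))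
    else pvMainA s (i + 1) (res ++ [s[i]])
  else res
termination_by s.length - i
decreasing_by
  · have h1 : (i : Int) ≤ pvFindLoop (s.drop i) i [] := pvFindLoop_lb _ _ _ he
    have h2 : (pvFindLoop (s.drop i) i []).toNat + 1 ≤ (pvApLoop s ((pvFindLoop (s.drop i) i []).toNat + 1) []).2 :=
      pvApLoop_lb _ _ _
    omega
  · omega

def reformat_code (input_str : String) : String := String.ofList (pvMainA input_str.toList 0 [])

-- ===== PORT B =====
-- body = ",\n".join(" " + it.strip() for it in items)
def pvFmtB (items : List (List Char)) : List Char :=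
  PySem.Chars.join [',', '\n'] (items.map (fun it => ' ' :: PySem.Chars.strip it))

-- B's single pass: pvOutB is the depth-0 mode, pvGrpB the inside-a-group mode with
-- state (depth d ≥ 1, raw chars since '(', completed items, current item).
mutual
def pvOutB : List Char → List Char
  | [] => []
  | c :: rest => if c = '(' then pvGrpB rest 1 ['('] [] [] else c :: pvOutB rest

def pvGrpB : List Char → Nat → List Char → List (List Char) → List Char → List Char
  | [], _, raw, _, _ => raw
  | c :: rest, d, raw, items, cur =>
    if c = '(' then pvGrpB rest (d + 1) (raw ++ [c]) items (cur ++ [c])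
    else if c = ')' then
      let d' := d - 1
      if d' = 0 then
        '(' :: '\n' :: pvFmtB (items ++ [cur]) ++ '\n' :: ')' :: pvOutB rest
      else pvGrpB rest d' (raw ++ [c]) items (cur ++ [c])
    else if c = ',' ∧ d = 1 then pvGrpB rest d (raw ++ [c]) (items ++ [cur]) []
    else pvGrpB rest d (raw ++ [c]) items (cur ++ [c])
end

def reformat_code_alt (input_str : String) : String := String.ofList (pvOutB input_str.toList)

-- ===== PRECONDITION & SPEC =====
def Spec_reformat_code (input_str : String) (out : String) : Prop := out = reformat_code_alt input_str
instance (input_str : String) (out : String) : Decidable (Spec_reformat_code input_str out) := by unfold Spec_reformat_code; infer_instance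

-- ===== CLAIM (what is proved, stated in full; the proofs are below) =====
def Claim_equal_reformat_code : Prop := ∀ (input_str : String), Dom_reformat_code input_str → Spec_reformat_code input_str (reformat_code input_str)

-- ===== LEMMAS AND PROOFS =====

-- close? cs d: split cs at the ')' that brings nesting depth d (≥ 1) down to 0:
-- some (inside, after) with cs = inside ++ ')' :: after, none if unbalanced.
def pvClose? : List Char → Nat → Option (List Char × List Char)
  | [], _ => none
  | c :: rest, d =>
    if c = ')' then
      if d = 1 then some ([], rest)
      else (pvClose? rest (d - 1)).map (fun p => (c :: p.1, p.2))
    else if c = '(' then (pvClose? rest (d + 1)).map (fun p => (c :: p.1, p.2))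
    else (pvClose? rest d).map (fun p => (c :: p.1, p.2))

-- prepend a to the first piece
def pvAddFirst (a : List Char) : List (List Char) → List (List Char)
  | [] => [a]
  | x :: xs => (a ++ x) :: xs

-- functional split-on-commas at tracked depth
def pvSocAt : List Char → Int → List (List Char)
  | [], _ => [[]]
  | c :: rest, d =>
    if c = ',' ∧ d = 0 then [] :: pvSocAt rest d
    else
      pvAddFirst [c]
        (pvSocAt rest (if c = '(' then d + 1 else if c = ')' then d - 1 else d))

theorem pvSocAt_ne_nil (cs : List Char) (d : Int) : pvSocAt cs d ≠ [] := by
  cases cs with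
  | nil => simp [pvSocAt]
  | cons c rest =>
    simp only [pvSocAt]
    split_ifs
    · simp
    all_goals (rename_i h; cases hh : pvSocAt rest _ <;> simp [pvAddFirst])

theorem pvAddFirst_addFirst (a b : List Char) (l : List (List Char)) :
    pvAddFirst a (pvAddFirst b l) = pvAddFirst (a ++ b) l := by
  cases l <;> simp [pvAddFirst]

theorem pvAddFirst_nil (l : List (List Char)) (h : l ≠ []) : pvAddFirst [] l = l := by
  cases l <;> simp_all [pvAddFirst]

theorem pvSoc_eq (cs : List Char) (res : List (List Char)) (cur : List Char) (d : Int) :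
    pvSocLoop cs res cur d = res ++ pvAddFirst cur (pvSocAt cs d) := by
  induction cs generalizing res cur d with
  | nil => simp [pvSocLoop, pvSocAt, pvAddFirst]
  | cons c rest ih =>
    by_cases h : c = ',' ∧ d = 0
    · rw [pvSocLoop, if_pos h, pvSocAt, if_pos h, ih,
        pvAddFirst_nil _ (pvSocAt_ne_nil rest d)]
      simp [pvAddFirst]
    · rw [pvSocLoop, if_neg h, pvSocAt, if_neg h, ih, pvAddFirst_addFirst]

theorem pvClose?_decomp (cs : List Char) (d : Nat) (p : List Char × List Char)
    (h : pvClose? cs d = some p) : cs = p.1 ++ ')' :: p.2 := by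
  induction cs generalizing d p with
  | nil => simp [pvClose?] at h
  | cons c rest ih =>
    simp only [pvClose?] at h
    split_ifs at h with h1 h2 h3
    · simp only [Option.some.injEq] at h
      subst h; subst h1; simp
    · rw [Option.map_eq_some_iff] at h
      obtain ⟨q, hq, hpq⟩ := h
      have hr := ih _ _ hq
      subst hpq; subst h1; simpa using hr
    · rw [Option.map_eq_some_iff] at h
      obtain ⟨q, hq, hpq⟩ := h
      have hr := ih _ _ hq
      subst hpq; subst h3; simpa using hr
    · rw [Option.map_eq_some_iff] at h
      obtain ⟨q, hq, hpq⟩ := h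
      have hr := ih _ _ hq
      subst hpq; simpa using hr

theorem pvFind_eq (cs : List Char) (i : Nat) (st : List Nat) (hst : st ≠ []) :
    pvFindLoop cs i st =
      (match pvClose? cs st.length with
       | none => -1
       | some p => ((i + p.1.length : Nat) : Int)) := by
  induction cs generalizing i st with
  | nil => simp [pvFindLoop, pvClose?]
  | cons c rest ih =>
    by_cases h1 : c = '('
    · subst h1
      have hstep : pvFindLoop ('(' :: rest) i st = pvFindLoop rest (i + 1) (i :: st) := by
        simp [pvFindLoop]
      have hcl : pvClose? ('(' :: rest) st.length =
          (pvClose? rest (st.length + 1)).map (fun p => ('(' :: p.1, p.2)) := by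
        simp [pvClose?]
      rw [hstep, ih (i + 1) (i :: st) (by simp), hcl]
      simp only [List.length_cons]
      cases hq : pvClose? rest (st.length + 1) with
      | none => simp
      | some p => simp; ring
    · by_cases h2 : c = ')'
      · subst h2
        cases st with
        | nil => exact absurd rfl hst
        | cons x st' =>
          cases st' with
          | nil =>
            have hstep : pvFindLoop (')' :: rest) i [x] = (i : Int) := by
              simp [pvFindLoop]
            have hcl : pvClose? (')' :: rest) ([x] : List Nat).length = some ([], rest) := by
              simp [pvClose?]
            rw [hstep, hcl]; simp
          | cons y st'' =>
            have hstep : pvFindLoop (')' :: rest) i (x :: y :: st'') =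
                pvFindLoop rest (i + 1) (y :: st'') := by
              simp [pvFindLoop]
            have hcl : pvClose? (')' :: rest) (x :: y :: st'').length =
                (pvClose? rest ((y :: st'') : List Nat).length).map (fun p => (')' :: p.1, p.2)) := by
              simp [pvClose?]
            rw [hstep, ih (i + 1) (y :: st'') (by simp), hcl]
            cases hq : pvClose? rest ((y :: st'') : List Nat).length with
            | none => simp
            | some p => simp; ring
      · have hstep : pvFindLoop (c :: rest) i st = pvFindLoop rest (i + 1) st := by
          simp [pvFindLoop, h1, h2]
        have hcl : pvClose? (c :: rest) st.length =
            (pvClose? rest st.length).map (fun p => (c :: p.1, p.2)) := by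
          simp [pvClose?, h1, h2]
        rw [hstep, ih (i + 1) st hst, hcl]
        cases hq : pvClose? rest st.length with
        | none => simp
        | some p => simp; ring

-- B's group scan, characterized by pvClose? / pvSocAt
theorem pvGrp_eq (cs : List Char) (d : Nat) (raw : List Char) (items : List (List Char))
    (cur : List Char) (hd : 1 ≤ d) :
    pvGrpB cs d raw items cur =
      (match pvClose? cs d with
       | none => raw ++ cs
       | some p =>
         '(' :: '\n' :: pvFmtB (items ++ pvAddFirst cur (pvSocAt p.1 ((d : Int) - 1))) ++
           '\n' :: ')' :: pvOutB p.2) := by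
  induction cs generalizing d raw items cur with
  | nil => simp [pvGrpB, pvClose?]
  | cons c rest ih =>
    by_cases h1 : c = '('
    · subst h1
      have hstep : pvGrpB ('(' :: rest) d raw items cur =
          pvGrpB rest (d + 1) (raw ++ ['(']) items (cur ++ ['(']) := by
        simp [pvGrpB]
      have hcl : pvClose? ('(' :: rest) d =
          (pvClose? rest (d + 1)).map (fun p => ('(' :: p.1, p.2)) := by
        simp [pvClose?]
      rw [hstep, ih (d + 1) (raw ++ ['(']) items (cur ++ ['(']) (by omega), hcl]
      cases hq : pvClose? rest (d + 1) with
      | none => simp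
      | some p =>
        simp only [Option.map_some]
        have hc2 : ((d + 1 : Nat) : Int) - 1 = (d : Int) - 1 + 1 := by push_cast; ring
        have hsoc : pvSocAt ('(' :: p.1) ((d : Int) - 1) =
            pvAddFirst ['('] (pvSocAt p.1 ((d : Int) - 1 + 1)) := by
          simp [pvSocAt]
        rw [hc2, hsoc, pvAddFirst_addFirst]
    · by_cases h2 : c = ')'
      · subst h2
        by_cases hone : d = 1
        · subst hone
          have hstep : pvGrpB (')' :: rest) 1 raw items cur =
              '(' :: '\n' :: pvFmtB (items ++ [cur]) ++ '\n' :: ')' :: pvOutB rest := by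
            simp [pvGrpB]
          have hcl : pvClose? (')' :: rest) 1 = some ([], rest) := by
            simp [pvClose?]
          rw [hstep, hcl]
          simp [pvSocAt, pvAddFirst]
        · have hd2 : 2 ≤ d := by omega
          have hstep : pvGrpB (')' :: rest) d raw items cur =
              pvGrpB rest (d - 1) (raw ++ [')']) items (cur ++ [')']) := by
            simp [pvGrpB, show d - 1 ≠ 0 by omega]
          have hcl : pvClose? (')' :: rest) d =
              (pvClose? rest (d - 1)).map (fun p => (')' :: p.1, p.2)) := by
            simp [pvClose?, hone]
          rw [hstep, ih (d - 1) (raw ++ [')']) items (cur ++ [')']) (by omega), hcl]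
          cases hq : pvClose? rest (d - 1) with
          | none => simp
          | some p =>
            simp only [Option.map_some]
            have hc2 : ((d - 1 : Nat) : Int) - 1 = (d : Int) - 1 - 1 := by omega
            have hsoc : pvSocAt (')' :: p.1) ((d : Int) - 1) =
                pvAddFirst [')'] (pvSocAt p.1 ((d : Int) - 1 - 1)) := by
              have hcond : ¬ (((')' : Char) = ',') ∧ ((d : Int) - 1) = 0) := by
                rintro ⟨hc, -⟩; exact absurd hc (by decide)
              rw [pvSocAt, if_neg hcond]
              simp
            rw [hc2, hsoc, pvAddFirst_addFirst]
      · by_cases h3 : c = ',' ∧ d = 1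
        · obtain ⟨rfl, rfl⟩ := h3
          have hstep : pvGrpB (',' :: rest) 1 raw items cur =
              pvGrpB rest 1 (raw ++ [',']) (items ++ [cur]) [] := by
            simp [pvGrpB]
          have hcl : pvClose? (',' :: rest) 1 =
              (pvClose? rest 1).map (fun p => (',' :: p.1, p.2)) := by
            simp [pvClose?]
          rw [hstep, ih 1 (raw ++ [',']) (items ++ [cur]) [] (by omega), hcl]
          cases hq : pvClose? rest 1 with
          | none => simp
          | some p =>
            simp only [Option.map_some]
            have hsoc : pvSocAt (',' :: p.1) ((1 : Nat) - 1 : Int) = [] :: pvSocAt p.1 0 := by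
              norm_num [pvSocAt]
            norm_num at hsoc ⊢
            rw [hsoc, pvAddFirst_nil _ (pvSocAt_ne_nil p.1 0)]
            simp [pvAddFirst]
        · have hstep : pvGrpB (c :: rest) d raw items cur =
              pvGrpB rest d (raw ++ [c]) items (cur ++ [c]) := by
            simp [pvGrpB, h1, h2, h3]
          have hcl : pvClose? (c :: rest) d =
              (pvClose? rest d).map (fun p => (c :: p.1, p.2)) := by
            simp [pvClose?, h1, h2]
          rw [hstep, ih d (raw ++ [c]) items (cur ++ [c]) hd, hcl]
          cases hq : pvClose? rest d with
          | none => simp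
          | some p =>
            simp only [Option.map_some]
            have hcond : ¬ ((c = ',') ∧ ((d : Int) - 1) = 0) := by
              rintro ⟨rfl, hz⟩
              exact h3 ⟨rfl, by omega⟩
            have hsoc : pvSocAt (c :: p.1) ((d : Int) - 1) =
                pvAddFirst [c] (pvSocAt p.1 ((d : Int) - 1)) := by
              rw [pvSocAt, if_neg hcond, if_neg h1, if_neg h2]
            rw [hsoc, pvAddFirst_addFirst]

-- pvOutB copies non-'(' characters verbatim
theorem pvOutB_copy (ap r : List Char) (h : ∀ c ∈ ap, c ≠ '(') :
    pvOutB (ap ++ r) = ap ++ pvOutB r := by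
  induction ap with
  | nil => simp
  | cons c rest ih =>
    have hc : c ≠ '(' := h c (by simp)
    simp only [List.cons_append, pvOutB, if_neg hc]
    rw [ih (fun x hx => h x (by simp [hx]))]

-- the enumerate/comma loop joined with "\n" equals ",\n".join of " "-prefixed items
theorem pvProc_eq (l : List (List Char)) (idx n : Nat) (hn : n = idx + l.length) :
    PySem.Chars.join ['\n'] (pvProcLoop l idx n) =
      PySem.Chars.join [',', '\n'] (l.map (fun it => ' ' :: it)) := by
  induction l generalizing idx with
  | nil => simp [pvProcLoop]
  | cons it rest ih =>
    cases rest with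
    | nil =>
      simp only [List.length_cons, List.length_nil] at hn
      have hnot : ¬ idx < n - 1 := by omega
      simp [pvProcLoop, hnot, PySem.Chars.join_singleton]
    | cons it2 rest2 =>
      simp only [List.length_cons] at hn
      have hlt : idx < n - 1 := by omega
      have ihr := ih (idx + 1) (by simp only [List.length_cons]; omega)
      simp only [pvProcLoop, if_pos hlt, List.map_cons, PySem.Chars.join_cons_cons]
      simp only [pvProcLoop, List.map_cons] at ihr
      rw [ihr]
      simp

-- A's process_content equals B's formatting of the functional split
theorem pvPC_eq (s : List Char) : pvProcessContent s = pvFmtB (pvSocAt s 0) := by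
  unfold pvProcessContent pvFmtB pvSplitOnCommas
  rw [pvSoc_eq, pvAddFirst_nil _ (pvSocAt_ne_nil s 0)]
  simp only [List.nil_append]
  rw [pvProc_eq _ 0 _ (by simp)]
  simp [List.map_map, Function.comp_def]

-- the after_paren loop collects the " \t;" prefix of the remaining suffix
theorem pvApLoop_eq (s : List Char) (j : Nat) (ap : List Char) :
    pvApLoop s j ap =
      (ap ++ (s.drop j).takeWhile (fun c => c = ' ' ∨ c = '\t' ∨ c = ';'),
       j + ((s.drop j).takeWhile (fun c => c = ' ' ∨ c = '\t' ∨ c = ';')).length) := by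
  fun_induction pvApLoop s j ap with
  | case1 j ap h hc ih =>
    rw [ih]
    have hd : s.drop j = s[j] :: s.drop (j + 1) := List.drop_eq_getElem_cons h
    rw [hd, List.takeWhile_cons, if_pos (by simpa using hc)]
    simp; omega
  | case2 j ap h hc =>
    have hd : s.drop j = s[j] :: s.drop (j + 1) := List.drop_eq_getElem_cons h
    rw [hd, List.takeWhile_cons, if_neg (by simpa using hc)]
    simp
  | case3 j ap h =>
    have : s.drop j = [] := List.drop_eq_nil_of_le (by omega)
    simp [this]

-- main equivalence: A's while loop from index i with accumulator res
theorem pvMain_eq (s : List Char) (n i : Nat) (res : List Char) (hn : s.length - i ≤ n) :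
    pvMainA s i res = res ++ pvOutB (s.drop i) := by
  induction n generalizing i res with
  | zero =>
    have hge : s.length ≤ i := by omega
    rw [pvMainA, dif_neg (by omega)]
    simp [List.drop_eq_nil_of_le hge, pvOutB]
  | succ n ih =>
    by_cases h : i < s.length
    · have hd : s.drop i = s[i] :: s.drop (i + 1) := List.drop_eq_getElem_cons h
      by_cases hp : s[i] = '('
      · -- the '(' case
        rw [pvMainA, dif_pos h, if_pos hp]
        have hstep : pvFindLoop (s.drop i) i [] = pvFindLoop (s.drop (i + 1)) (i + 1) [i] := by
          rw [hd, pvFindLoop, if_pos hp]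
        rw [pvFind_eq (s.drop (i + 1)) (i + 1) [i] (by simp)] at hstep
        simp only [List.length_singleton] at hstep
        cases hq : pvClose? (s.drop (i + 1)) 1 with
        | none =>
          rw [hq] at hstep
          simp only [hstep]
          rw [dif_pos trivial]
          conv_rhs => rw [hd]
          rw [pvOutB, if_pos hp, pvGrp_eq (s.drop (i + 1)) 1 ['('] [] [] (by omega), hq]
          rw [hd, hp]
          simp
        | some p =>
          rw [hq] at hstep
          have hdec : s.drop (i + 1) = p.1 ++ ')' :: p.2 := pvClose?_decomp _ _ _ hq
          simp only [hstep]
          rw [dif_neg (by omega : ¬ (((i + 1 + p.1.length : Nat) : Int) = -1))]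
          have hcontent :
              PySem.List.slice s (some ((i : Int) + 1)) (some ((i + 1 + p.1.length : Nat) : Int)) = p.1 := by
            have h1 : ((i : Int) + 1) = ((i + 1 : Nat) : Int) := by push_cast; ring
            rw [h1, PySem.List.slice_natCast, hdec]
            have h2 : i + 1 + p.1.length - (i + 1) = p.1.length := by omega
            rw [h2]
            exact List.take_left' rfl
          have htn : (((i + 1 + p.1.length : Nat) : Int)).toNat + 1 = i + 2 + p.1.length := by omega
          have hdrop2 : s.drop (i + 2 + p.1.length) = p.2 := by
            have h3 : s.drop (i + 2 + p.1.length) = (s.drop (i + 1)).drop (p.1.length + 1) := by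
              rw [List.drop_drop]; ring_nf
            rw [h3, hdec]
            exact List.drop_length_add_append (l₁ := p.1) (l₂ := ')' :: p.2) 1
          have hap := pvApLoop_eq s (i + 2 + p.1.length) []
          rw [hdrop2] at hap
          set tw := p.2.takeWhile (fun c => decide (c = ' ' ∨ c = '\t' ∨ c = ';')) with htw
          have htwdw : tw ++ p.2.dropWhile (fun c => decide (c = ' ' ∨ c = '\t' ∨ c = ';')) = p.2 :=
            List.takeWhile_append_dropWhile
          have hdropj : s.drop (i + 2 + p.1.length + tw.length) =
              p.2.dropWhile (fun c => decide (c = ' ' ∨ c = '\t' ∨ c = ';')) := by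
            have h4 : s.drop (i + 2 + p.1.length + tw.length) = (s.drop (i + 2 + p.1.length)).drop tw.length := by
              rw [List.drop_drop]
            rw [h4, hdrop2]
            conv_lhs => rw [← htwdw]
            exact List.drop_length_add_append (l₁ := tw)
              (l₂ := p.2.dropWhile (fun c => decide (c = ' ' ∨ c = '\t' ∨ c = ';'))) 0
          rw [hcontent, htn, hap]
          have ihr := ih (i + 2 + p.1.length + tw.length)
            (res ++ ('(' :: '\n' :: pvProcessContent p.1) ++ ('\n' :: ')' :: tw)) (by omega)
          simp only [List.nil_append]
          rw [ihr, hdropj]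
          -- B side
          conv_rhs => rw [hd]
          rw [pvOutB, if_pos hp, pvGrp_eq (s.drop (i + 1)) 1 ['('] [] [] (by omega), hq]
          simp only [List.nil_append]
          have hsoc1 : pvAddFirst [] (pvSocAt p.1 (((1 : Nat) : Int) - 1)) = pvSocAt p.1 0 := by
            norm_num
            exact pvAddFirst_nil _ (pvSocAt_ne_nil p.1 0)
          have houtr : pvOutB p.2 =
              tw ++ pvOutB (p.2.dropWhile (fun c => decide (c = ' ' ∨ c = '\t' ∨ c = ';'))) := by
            conv_lhs => rw [← htwdw]
            apply pvOutB_copy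
            intro c hc
            have hmem := List.mem_takeWhile_imp hc
            simp only [decide_eq_true_eq] at hmem
            rcases hmem with h'|h'|h' <;> simp [h']
          rw [houtr, pvPC_eq]
          simp only [hsoc1]
          simp
      · rw [pvMainA, dif_pos h, if_neg hp]
        rw [ih (i + 1) (res ++ [s[i]]) (by omega)]
        rw [hd, pvOutB, if_neg hp]
        simp
    · rw [pvMainA, dif_neg h]
      simp [List.drop_eq_nil_of_le (by omega : s.length ≤ i), pvOutB]

-- ===== VERDICT (by name: the statement is the Claim_ definition above) =====
theorem reformat_code_spec : Claim_equal_reformat_code := by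
  intro s _
  unfold Spec_reformat_code reformat_code reformat_code_alt
  congr 1
  simpa using pvMain_eq s.toList s.toList.length 0 []  (by omega)
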